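-- pv_equiv track=rewrite | github.com/whyj107/CodeWar | 20210824_Hidden Cubic numbers.py | is_sum_of_cubes
-- ===== SOURCE A (Python) =====
-- def is_sum_of_cubes(s):
--     n = ''
--     result = []
--     for i in s+'.':
--         if i.isnumeric():
--             n += i
--         if len(n) == 3 or (not i.isnumeric() and len(n) != 0):
--             if iscubeNum(n):
--                 result.append(n)
--             n = ''
--     return "Unlucky" if len(result) == 0 else f"{' '.join(result)} {sum(map(int, result))} Lucky"
--
-- def iscubeNum(n):
--     return sum([int(i)**3 for i in n]) == int(n)
-- ===== SOURCE B (Python) =====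
-- def is_sum_of_cubes(s):
--     # Two-phase: extract maximal numeric runs, then slice each run into 3-char chunks.
--     result = []
--     i, ln = 0, len(s)
--     while i < ln:
--         if not s[i].isnumeric():
--             i += 1
--             continue
--         j = i
--         while j < ln and s[j].isnumeric():
--             j += 1
--         run = s[i:j]
--         for k in range(0, len(run), 3):
--             chunk = run[k:k+3]
--             if sum(int(c)**3 for c in chunk) == int(chunk):
--                 result.append(chunk)
--         i = j
--     return "Unlucky" if len(result) == 0 else f"{' '.join(result)} {sum(map(int, result))} Lucky"
-- ===== Notes on version B (the rewrite author's own statement) =====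
-- stated objective: alternative
-- what changed: B replaces A's single stateful char-by-char accumulator scan with a two-phase pass that first extracts maximal numeric runs by index jumps and then slices each run into 3-character chunks.
import Mathlib
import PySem

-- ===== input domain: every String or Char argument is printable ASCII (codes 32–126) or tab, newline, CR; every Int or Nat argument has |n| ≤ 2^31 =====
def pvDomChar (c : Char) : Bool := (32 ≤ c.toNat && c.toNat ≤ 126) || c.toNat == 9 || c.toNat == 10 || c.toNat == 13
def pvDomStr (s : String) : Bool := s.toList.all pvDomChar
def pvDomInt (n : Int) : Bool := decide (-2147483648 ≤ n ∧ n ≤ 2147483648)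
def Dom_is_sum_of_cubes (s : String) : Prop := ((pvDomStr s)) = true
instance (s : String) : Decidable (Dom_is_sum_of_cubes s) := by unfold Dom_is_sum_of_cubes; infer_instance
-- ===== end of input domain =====

-- B replaces A's stateful char-by-char scan with a two-phase pass (extract maximal
-- numeric runs, then slice each run into 3-char chunks); same results, no speed claim.

-- Shared primitives (exact on the printable-ASCII domain):
-- str.isnumeric() on printable ASCII (+ tab/nl/cr) is exactly '0'..'9'.
def isDig (c : Char) : Bool := c.isDigit
-- int(n) for a nonempty ASCII digit string (the only strings both programs pass to int); exact there.
def strVal (n : List Char) : Int := n.foldl (fun a c => 10 * a + ((c.toNat : Int) - 48)) 0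
-- iscubeNum(n): sum of digit cubes equals int(n).
def cube (n : List Char) : Bool := (n.map (fun c => ((c.toNat : Int) - 48) ^ 3)).sum == strVal n
-- the identical final line of both Pythons: "Unlucky" or "<joined> <sum> Lucky"
def render (result : List (List Char)) : String :=
  if result.length = 0 then "Unlucky"
  else String.ofList (PySem.Chars.join [' '] result ++ [' '] ++
         PySem.Int.toChars ((result.map strVal).sum) ++ " Lucky".toList)

-- ===== PORT A =====
-- A's loop body: append digit to n, flush n on length 3 or at a non-digit
def stepA (st : List Char × List (List Char)) (i : Char) : List Char × List (List Char) :=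
  let n := if isDig i then st.1 ++ [i] else st.1
  if n.length = 3 ∨ (¬ isDig i ∧ n.length ≠ 0) then
    (([] : List Char), if cube n then st.2 ++ [n] else st.2)
  else (n, st.2)

def is_sum_of_cubes (s : String) : String :=
  render ((s.toList ++ ['.']).foldl stepA ([], [])).2

-- ===== PORT B =====
-- maximal numeric runs (B's outer while loop with index jumps)
def digitRuns : List Char → List (List Char)
  | [] => []
  | c :: cs =>
    if isDig c then (c :: cs.takeWhile isDig) :: digitRuns (cs.dropWhile isDig)
    else digitRuns cs
termination_by l => l.length
decreasing_by
  · exact Nat.lt_succ_of_le (List.length_dropWhile_le _ _)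
  · simp

-- run[k:k+3] for k in range(0, len(run), 3) — structural form of B's slicing loop
def chunks3 : List Char → List (List Char)
  | [] => []
  | c :: cs => ((c :: cs).take 3) :: chunks3 ((c :: cs).drop 3)
termination_by l => l.length
decreasing_by simp

def is_sum_of_cubes_alt (s : String) : String :=
  render ((digitRuns s.toList).flatMap (fun run => (chunks3 run).filter cube))

-- ===== PRECONDITION & SPEC =====
def Spec_is_sum_of_cubes (s : String) (out : String) : Prop := out = is_sum_of_cubes_alt s
instance (s : String) (out : String) : Decidable (Spec_is_sum_of_cubes s out) := by unfold Spec_is_sum_of_cubes; infer_instance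

-- ===== CLAIM (what is proved, stated in full; the proofs are below) =====
def Claim_equal_is_sum_of_cubes : Prop := ∀ (s : String), Dom_is_sum_of_cubes s → Spec_is_sum_of_cubes s (is_sum_of_cubes s)

-- ===== LEMMAS AND PROOFS =====

-- the stream of chunks A's loop flushes, with pending accumulator `p`
def specChunks (p : List Char) : List Char → List (List Char)
  | [] => if p = [] then [] else [p]
  | c :: cs =>
    if isDig c then
      (if (p ++ [c]).length = 3 then (p ++ [c]) :: specChunks [] cs
       else specChunks (p ++ [c]) cs)
    else (if p = [] then specChunks [] cs else p :: specChunks [] cs)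

theorem stepA_digit_full {c : Char} (p : List Char) (res : List (List Char))
    (hd : isDig c = true) (h3 : (p ++ [c]).length = 3) :
    stepA (p, res) c = ([], if cube (p ++ [c]) then res ++ [p ++ [c]] else res) := by
  simp [stepA, hd, h3]

theorem stepA_digit_part {c : Char} (p : List Char) (res : List (List Char))
    (hd : isDig c = true) (h3 : (p ++ [c]).length ≠ 3) :
    stepA (p, res) c = (p ++ [c], res) := by
  have h3' : ¬ p.length = 2 := by simp at h3; omega
  simp [stepA, hd, h3']

theorem stepA_nondigit_nil {c : Char} (res : List (List Char)) (hd : isDig c = false) :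
    stepA ([], res) c = ([], res) := by
  simp [stepA, hd]

theorem stepA_nondigit {c : Char} (p : List Char) (res : List (List Char))
    (hd : isDig c = false) (hp : p ≠ []) :
    stepA (p, res) c = ([], if cube p then res ++ [p] else res) := by
  simp [stepA, hd, hp]

theorem foldlA_eq (cs : List Char) : ∀ (p : List Char) (res : List (List Char)),
    p.length ≤ 2 →
    ((cs ++ ['.']).foldl stepA (p, res)).2 = res ++ (specChunks p cs).filter cube := by
  induction cs with
  | nil =>
    intro p res _
    have hd : isDig '.' = false := by decide
    by_cases h : p = []
    · subst h
      rw [List.nil_append, List.foldl_cons, stepA_nondigit_nil res hd]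
      simp [specChunks]
    · rw [List.nil_append, List.foldl_cons, stepA_nondigit p res hd h]
      simp only [specChunks]
      rw [if_neg h]
      split <;> rename_i hc <;> simp [hc]
  | cons c cs ih =>
    intro p res hp
    rw [List.cons_append, List.foldl_cons]
    by_cases hd : isDig c
    · by_cases h3 : (p ++ [c]).length = 3
      · rw [stepA_digit_full p res hd h3, ih [] _ (by simp)]
        simp only [specChunks, hd, if_true, h3]
        split <;> rename_i hc <;> simp [hc]
      · have hle : (p ++ [c]).length ≤ 2 := by simp at h3 ⊢; omega
        rw [stepA_digit_part p res hd h3, ih _ _ hle]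
        simp only [specChunks, hd, if_true]
        rw [if_neg h3]
    · by_cases h : p = []
      · subst h
        rw [stepA_nondigit_nil res (by simpa using hd), ih [] _ (by simp)]
        simp [specChunks, hd]
      · rw [stepA_nondigit p res (by simpa using hd) h, ih [] _ (by simp)]
        simp only [specChunks, hd, if_false, Bool.false_eq_true]
        rw [if_neg h]
        split <;> rename_i hc <;> simp [hc]

theorem chunks3_ne_nil (l : List Char) (h : l ≠ []) :
    chunks3 l = l.take 3 :: chunks3 (l.drop 3) := by
  cases l with
  | nil => exact absurd rfl h
  | cons c cs => rw [chunks3]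

theorem chunks3_nil : chunks3 [] = [] := by rw [chunks3]

theorem chunks3_short (l : List Char) (h : l.length ≤ 3) :
    chunks3 l = if l = [] then [] else [l] := by
  by_cases hn : l = []
  · simp [hn, chunks3_nil]
  · rw [chunks3_ne_nil l hn, List.take_of_length_le h, List.drop_eq_nil_of_le h,
      chunks3_nil]
    simp [hn]

theorem specChunks_run (run : List Char) : ∀ (p rest : List Char),
    p.length ≤ 2 → (∀ c ∈ run, isDig c = true) →
    (rest = [] ∨ ∃ d rest', rest = d :: rest' ∧ isDig d = false) →
    specChunks p (run ++ rest) = chunks3 (p ++ run) ++ specChunks [] rest := by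
  induction run with
  | nil =>
    intro p rest hp _ hrest
    have hch : chunks3 p = if p = [] then [] else [p] := chunks3_short p (by omega)
    rcases hrest with h | ⟨d, rest', rfl, hdd⟩
    · subst h; simp [specChunks, hch]
    · simp only [List.nil_append, List.append_nil, specChunks, hdd, Bool.false_eq_true,
        if_false, hch]
      by_cases h : p = [] <;> simp [h]
  | cons a run' ih =>
    intro p rest hp hdig hrest
    have ha : isDig a = true := hdig a (by simp)
    by_cases h3 : (p ++ [a]).length = 3
    · rw [List.cons_append, show specChunks p (a :: (run' ++ rest)) =
          (p ++ [a]) :: specChunks [] (run' ++ rest) by simp [specChunks, ha, h3],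
        ih [] rest (by simp) (fun c hc => hdig c (by simp [hc])) hrest]
      rw [chunks3_ne_nil (p ++ a :: run') (by simp),
        show p ++ a :: run' = (p ++ [a]) ++ run' by simp,
        List.take_left' h3, List.drop_left' h3]
      simp
    · have hle : (p ++ [a]).length ≤ 2 := by simp at h3 ⊢; omega
      have h3' : ¬ p.length = 2 := by simp at h3; omega
      rw [List.cons_append, show specChunks p (a :: (run' ++ rest)) =
          specChunks (p ++ [a]) (run' ++ rest) by simp [specChunks, ha, h3'],
        ih (p ++ [a]) rest hle (fun c hc => hdig c (by simp [hc])) hrest]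
      simp

theorem specChunks_eq (cs : List Char) :
    specChunks [] cs = (digitRuns cs).flatMap chunks3 := by
  induction cs using digitRuns.induct with
  | case1 => simp [specChunks, digitRuns]
  | case2 c cs hd ih =>
    have hrest : cs.dropWhile isDig = [] ∨
        ∃ d rest', cs.dropWhile isDig = d :: rest' ∧ isDig d = false := by
      cases h : cs.dropWhile isDig with
      | nil => exact Or.inl rfl
      | cons d rest' =>
        refine Or.inr ⟨d, rest', rfl, ?_⟩
        have := List.head_dropWhile_not isDig (l := cs) (by simp [h])
        simpa [h] using this
    have hdig : ∀ x ∈ c :: cs.takeWhile isDig, isDig x = true := by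
      intro x hx
      rcases List.mem_cons.mp hx with h | h
      · exact h ▸ hd
      · exact List.mem_takeWhile_imp h
    rw [show c :: cs = (c :: cs.takeWhile isDig) ++ cs.dropWhile isDig by
        simp [List.takeWhile_append_dropWhile],
      specChunks_run _ [] _ (by simp) hdig hrest, ih, List.cons_append,
      List.takeWhile_append_dropWhile,
      show digitRuns (c :: cs) = (c :: cs.takeWhile isDig) :: digitRuns (cs.dropWhile isDig)
        from by rw [digitRuns, if_pos hd]]
    simp
  | case3 c cs hd ih =>
    have hd' : isDig c = false := by simpa using hd
    rw [show specChunks [] (c :: cs) = specChunks [] cs by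
        simp [specChunks, hd'], ih,
      show digitRuns (c :: cs) = digitRuns cs from by rw [digitRuns, if_neg (by simp [hd'])]]

theorem filter_flatMap_chunks (l : List (List Char)) :
    (l.flatMap chunks3).filter cube = l.flatMap (fun run => (chunks3 run).filter cube) := by
  induction l with
  | nil => rfl
  | cons a l ih => simp [List.flatMap_cons, List.filter_append, ih]

-- ===== VERDICT (by name: the statement is the Claim_ definition above) =====
theorem is_sum_of_cubes_spec : Claim_equal_is_sum_of_cubes := by
  intro s _
  show is_sum_of_cubes s = is_sum_of_cubes_alt s
  unfold is_sum_of_cubes is_sum_of_cubes_alt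
  rw [foldlA_eq s.toList [] [] (by simp), specChunks_eq, filter_flatMap_chunks]
  rfl
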